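-- pv_equiv track=rewrite | github.com/polaris64/advent-of-code | 2023/04/solve.py | get_card_score
-- ===== SOURCE A (Python) =====
-- def get_winning_numbers(card):
--     for n in card[2]:
--         if n in card[1]:
--             yield n
--
-- def get_card_score(card):
--     score = 0
--     for n in get_winning_numbers(card):
--         if score == 0:
--             score = 1
--         else:
--             score *= 2
--     return score
-- ===== SOURCE B (Python) =====
-- def get_card_score(card):
--     win = sorted(set(card[1]))
--     have = sorted(card[2])
--     i = j = k = 0
--     while i < len(win) and j < len(have):
--         if win[i] < have[j]:
--             i += 1
--         elif have[j] < win[i]: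
--             j += 1
--         else:
--             k += 1
--             j += 1
--     return 0 if k == 0 else 1 << (k - 1)
-- ===== Notes on version B (the rewrite author's own statement) =====
-- stated objective: faster
-- what changed: Replaces the generator with per-element list-membership scans and the iterative doubling loop by a sort of the distinct winning numbers, a sort of the held numbers, a two-pointer merge that counts matches, and the closed form 0 / 1<<(k-1).
import Mathlib
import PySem

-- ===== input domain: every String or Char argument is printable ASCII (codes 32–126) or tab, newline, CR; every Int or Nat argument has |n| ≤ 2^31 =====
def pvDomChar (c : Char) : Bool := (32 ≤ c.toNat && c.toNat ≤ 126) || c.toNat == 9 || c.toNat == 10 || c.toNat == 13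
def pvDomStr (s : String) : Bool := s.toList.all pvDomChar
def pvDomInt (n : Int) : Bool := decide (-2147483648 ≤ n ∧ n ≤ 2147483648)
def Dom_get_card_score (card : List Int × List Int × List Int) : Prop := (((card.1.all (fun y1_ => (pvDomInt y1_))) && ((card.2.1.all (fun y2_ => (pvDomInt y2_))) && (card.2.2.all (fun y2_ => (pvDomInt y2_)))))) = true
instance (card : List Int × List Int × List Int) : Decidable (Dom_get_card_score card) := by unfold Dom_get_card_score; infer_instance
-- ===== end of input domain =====

-- B replaces A's generator + doubling loop by sorting both lists and counting matches with a
-- two-pointer merge, then the closed form 0 / 2^(k-1); objective: faster (sort-merge vs nested scans).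

-- ===== PORT A =====
-- generator 'yield n for n in card[2] if n in card[1]', consumed in order
def get_winning_numbers (card : List Int × List Int × List Int) : List Int :=
  card.2.2.filter (fun n => decide (n ∈ card.2.1))

def get_card_score (card : List Int × List Int × List Int) : Int :=
  (get_winning_numbers card).foldl (fun score _n => if score = 0 then 1 else score * 2) 0

-- ===== PORT B =====
-- Source B's while-loop over indices i, j; advancing a pointer = dropping the head of that list
def pvMergeCount : List Int → List Int → Int
  | [], _ => 0
  | _ :: _, [] => 0
  | a :: as, b :: bs =>
      if a < b then pvMergeCount as (b :: bs)
      else if b < a then pvMergeCount (a :: as) bs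
      else pvMergeCount (a :: as) bs + 1
  termination_by w h => w.length + h.length

def get_card_score_alt (card : List Int × List Int × List Int) : Int :=
  let win := PySem.List.sorted (PySem.Set.ofList card.2.1) (fun x => x) false   -- sorted(set(card[1]))
  let held := PySem.List.sorted card.2.2 (fun x => x) false                     -- sorted(card[2])
  let k := pvMergeCount win held
  if k = 0 then 0 else 2 ^ (k - 1).toNat

-- ===== PRECONDITION & SPEC =====
def Spec_get_card_score (card : List Int × List Int × List Int) (out : Int) : Prop := out = get_card_score_alt card
instance (card : List Int × List Int × List Int) (out : Int) : Decidable (Spec_get_card_score card out) := by unfold Spec_get_card_score; infer_instance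

-- ===== CLAIM (what is proved, stated in full; the proofs are below) =====
def Claim_equal_get_card_score : Prop := ∀ (card : List Int × List Int × List Int), Dom_get_card_score card → Spec_get_card_score card (get_card_score card)

-- ===== LEMMAS AND PROOFS =====

-- A's doubling loop from a positive start multiplies by 2 per element
lemma doubling_foldl (l : List Int) (s : Int) (hs : 0 < s) :
    l.foldl (fun score _n => if score = 0 then 1 else score * 2) s = s * 2 ^ l.length := by
  induction l generalizing s with
  | nil => simp
  | cons x xs ih =>
      have hs' : s ≠ 0 := ne_of_gt hs
      simp only [List.foldl_cons, if_neg hs', List.length_cons, ih (s * 2) (by positivity)]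
      ring

-- the merge on a strictly increasing w and a weakly increasing h counts h's members of w
lemma mergeCount_eq (w h : List Int) (hw : w.Pairwise (· < ·)) (hh : h.Pairwise (· ≤ ·)) :
    pvMergeCount w h = ((h.filter (fun b => decide (b ∈ w))).length : Int) := by
  fun_induction pvMergeCount w h with
  | case1 h => simp
  | case2 => simp
  | case3 a as b bs hab ih =>
      -- a < b ≤ every element of b :: bs, so a never matches
      have hfe : (b :: bs).filter (fun x => decide (x ∈ a :: as))
               = (b :: bs).filter (fun x => decide (x ∈ as)) := by
        apply List.filter_congr
        intro x hx
        have hbx : b ≤ x := by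
          rcases List.mem_cons.mp hx with rfl | hx
          · exact le_refl _
          · exact (List.pairwise_cons.mp hh).1 x hx
        have : x ≠ a := by omega
        simp [this]
      rw [hfe]
      exact ih (List.pairwise_cons.mp hw).2 hh
  | case4 a as b bs hab hba ih =>
      -- b < a ≤ every element of a :: as, so b is not a member
      have hbnm : b ∉ a :: as := by
        intro hmem
        rcases List.mem_cons.mp hmem with rfl | hmem
        · omega
        · have := (List.pairwise_cons.mp hw).1 b hmem; omega
      rw [List.filter_cons_of_neg (by simp [hbnm])]
      exact ih hw (List.pairwise_cons.mp hh).2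
  | case5 a as b bs hab hba ih =>
      have heq : a = b := by omega
      have hbm : b ∈ a :: as := by simp [heq]
      rw [List.filter_cons_of_pos (by simp [hbm])]
      simp only [List.length_cons, Nat.cast_add, Nat.cast_one]
      rw [ih hw (List.pairwise_cons.mp hh).2]

-- the two sorts do not change which elements match, nor how many
lemma merge_counts_matches (card : List Int × List Int × List Int) :
    pvMergeCount (PySem.List.sorted (PySem.Set.ofList card.2.1) (fun x => x) false)
                 (PySem.List.sorted card.2.2 (fun x => x) false)
    = ((card.2.2.filter (fun n => decide (n ∈ card.2.1))).length : Int) := by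
  set w := PySem.List.sorted (PySem.Set.ofList card.2.1) (fun x => x) false with hw
  set h := PySem.List.sorted card.2.2 (fun x => x) false with hh
  have hwp : w.Pairwise (· < ·) := PySem.List.sorted_ofList_pairwise_lt card.2.1
  have hhp : h.Pairwise (· ≤ ·) := by
    have := PySem.List.sorted_pairwise card.2.2 (fun x => x)
    simpa using this
  rw [mergeCount_eq w h hwp hhp]
  congr 1
  have hmemw : ∀ x : Int, (x ∈ w) = (x ∈ card.2.1) := by
    intro x
    simp [hw, PySem.List.mem_sorted, PySem.Set.mem_ofList]
  have hperm : h.Perm card.2.2 := PySem.List.sorted_perm card.2.2 (fun x => x) false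
  have : h.filter (fun b => decide (b ∈ w)) = h.filter (fun b => decide (b ∈ card.2.1)) := by
    apply List.filter_congr; intro x _; simp [hmemw x]
  rw [this]
  exact (hperm.filter _).length_eq

-- ===== VERDICT (by name: the statement is the Claim_ definition above) =====
theorem get_card_score_spec : Claim_equal_get_card_score := by
  intro card _
  unfold Spec_get_card_score get_card_score get_card_score_alt get_winning_numbers
  simp only [merge_counts_matches]
  set l := card.2.2.filter (fun n => decide (n ∈ card.2.1)) with hl
  cases l with
  | nil => simp
  | cons x xs =>
      simp only [List.foldl_cons, List.length_cons, if_true, Nat.cast_add, Nat.cast_one]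
      rw [doubling_foldl xs 1 one_pos, one_mul]
      have hk : ((xs.length : Int) + 1) ≠ 0 := by positivity
      rw [if_neg hk]
      congr 1
      omega
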